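-- pv_equiv track=rewrite | github.com/kamiderka/WDI-2024 | Zestaw 2 - Tablice jednowymiarowe/zad075.py | has_exactly_one_largest_and_smallest_number
-- ===== SOURCE A (Python) =====
-- def has_exactly_one_largest_and_smallest_number(nums :list)->bool:
--     min,     max     = float('inf'),float('-inf')
--     dup_min, dup_max = False, False
--
--     for num in nums:
--         if num >= max:
--             dup_max = num == max
--             max = num
--         if num <= min:
--             dup_min = num == min
--             min = num
--
--     return not (dup_min or dup_max)
-- ===== SOURCE B (Python) =====
-- def has_exactly_one_largest_and_smallest_number(nums: list) -> bool:
--     if not nums: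
--         return True
--     return nums.count(min(nums)) == 1 and nums.count(max(nums)) == 1
-- ===== Notes on version B (the rewrite author's own statement) =====
-- stated objective: idiomatic
-- what changed: Replaces A's single running scan maintaining min/max with duplicate flags by the idiomatic form: an explicit empty-list guard, then builtin min/max followed by counting how often each extreme occurs.
import Mathlib
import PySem

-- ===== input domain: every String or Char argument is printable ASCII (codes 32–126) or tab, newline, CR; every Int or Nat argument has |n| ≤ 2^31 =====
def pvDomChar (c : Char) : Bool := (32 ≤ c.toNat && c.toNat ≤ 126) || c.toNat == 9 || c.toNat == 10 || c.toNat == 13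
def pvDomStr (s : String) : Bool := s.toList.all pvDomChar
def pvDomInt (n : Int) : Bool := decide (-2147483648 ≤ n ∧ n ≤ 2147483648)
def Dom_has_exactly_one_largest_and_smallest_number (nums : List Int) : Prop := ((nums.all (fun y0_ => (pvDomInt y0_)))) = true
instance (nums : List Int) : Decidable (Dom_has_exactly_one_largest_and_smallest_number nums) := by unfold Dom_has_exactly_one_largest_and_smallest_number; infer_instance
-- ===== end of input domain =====

-- B replaces A's single running scan with duplicate flags by the idiomatic form:
-- empty-list guard, then builtin min/max and a count of each extreme (objective: idiomatic).


-- ===== PORT A =====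
-- state = (min, max, dup_min, dup_max); `none` plays float('inf') / float('-inf')
def pvStepA (st : Option Int × Option Int × Bool × Bool) (num : Int) : Option Int × Option Int × Bool × Bool :=
  let (mn, mx, dupMin, dupMax) := st
  -- if num >= max: dup_max = (num == max); max = num   (num ≥ -inf is always true)
  let (mx, dupMax) :=
    if mx.all (fun v => num ≥ v) then (some num, mx == some num) else (mx, dupMax)
  -- if num <= min: dup_min = (num == min); min = num
  let (mn, dupMin) :=
    if mn.all (fun v => num ≤ v) then (some num, mn == some num) else (mn, dupMin)
  (mn, mx, dupMin, dupMax)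

def has_exactly_one_largest_and_smallest_number (nums : List Int) : Bool :=
  let st := nums.foldl pvStepA (none, none, false, false)
  !(st.2.2.1 || st.2.2.2)

-- ===== PORT B =====
def has_exactly_one_largest_and_smallest_number_alt (nums : List Int) : Bool :=
  match nums with
  | [] => true
  | _ :: _ =>
    match PySem.List.min? nums (fun y => y), PySem.List.max? nums (fun y => y) with
    | some mn, some mx => (PySem.List.count nums mn == 1) && (PySem.List.count nums mx == 1)
    | _, _ => true  -- unreachable: min?/max? of a nonempty list are some

-- ===== PRECONDITION & SPEC =====
def Spec_has_exactly_one_largest_and_smallest_number (nums : List Int) (out : Bool) : Prop := out = has_exactly_one_largest_and_smallest_number_alt nums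
instance (nums : List Int) (out : Bool) : Decidable (Spec_has_exactly_one_largest_and_smallest_number nums out) := by unfold Spec_has_exactly_one_largest_and_smallest_number; infer_instance

-- ===== CLAIM (what is proved, stated in full; the proofs are below) =====
def Claim_equal_has_exactly_one_largest_and_smallest_number : Prop := ∀ (nums : List Int), Dom_has_exactly_one_largest_and_smallest_number nums → Spec_has_exactly_one_largest_and_smallest_number nums (has_exactly_one_largest_and_smallest_number nums)

-- ===== LEMMAS AND PROOFS =====

-- the minimum computed by a running foldl is a member and a lower bound
theorem pv_foldl_min_mem (x : Int) (r : List Int) : r.foldl min x ∈ x :: r := by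
  have h := PySem.List.min?_id_cons x r
  exact PySem.List.min?_mem h

theorem pv_foldl_min_le (x : Int) (r : List Int) : ∀ a ∈ x :: r, r.foldl min x ≤ a := by
  have h := PySem.List.min?_id_cons x r
  exact fun a ha => PySem.List.min?_isMin h a ha

theorem pv_foldl_max_mem (x : Int) (r : List Int) : r.foldl max x ∈ x :: r := by
  have h := PySem.List.max?_id_cons x r
  exact PySem.List.max?_mem h

theorem pv_foldl_max_ge (x : Int) (r : List Int) : ∀ a ∈ x :: r, a ≤ r.foldl max x := by
  have h := PySem.List.max?_id_cons x r
  exact fun a ha => PySem.List.max?_isMax h a ha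

-- closed form of A's whole loop on a nonempty list: the running min/max, and each
-- duplicate flag is exactly "that extreme occurs at least twice"
theorem pv_runA (x : Int) (r : List Int) :
    (x :: r).foldl pvStepA (none, none, false, false) =
      (some (r.foldl min x), some (r.foldl max x),
       decide (2 ≤ (x :: r).count (r.foldl min x)),
       decide (2 ≤ (x :: r).count (r.foldl max x))) := by
  induction r using List.reverseRecOn with
  | nil =>
    simp [pvStepA]
  | append_singleton r y ih =>
    have hrw : x :: (r ++ [y]) = (x :: r) ++ [y] := by simp
    rw [hrw]
    simp only [List.foldl_append]
    rw [ih]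
    simp only [List.foldl_cons, List.foldl_nil]
    have hstep : pvStepA (some (r.foldl min x), some (r.foldl max x),
        decide (2 ≤ (x :: r).count (r.foldl min x)),
        decide (2 ≤ (x :: r).count (r.foldl max x))) y =
        ((if y ≤ r.foldl min x then some y else some (r.foldl min x)),
         (if r.foldl max x ≤ y then some y else some (r.foldl max x)),
         (if y ≤ r.foldl min x then decide (y = r.foldl min x)
            else decide (2 ≤ (x :: r).count (r.foldl min x))),
         (if r.foldl max x ≤ y then decide (y = r.foldl max x)
            else decide (2 ≤ (x :: r).count (r.foldl max x)))) := by
      simp only [pvStepA, Option.all_some, ge_iff_le]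
      by_cases h1 : r.foldl max x ≤ y <;> by_cases h2 : y ≤ r.foldl min x <;>
        simp [h1, h2, beq_eq_decide, eq_comm]
    rw [hstep]
    have hcnt : ∀ v : Int, ((x :: r) ++ [y]).count v = (x :: r).count v + if y = v then 1 else 0 := by
      intro v
      rw [List.count_append]
      simp [List.count_singleton, beq_iff_eq]
    refine Prod.ext ?_ (Prod.ext ?_ (Prod.ext ?_ ?_))
    · by_cases h : y ≤ r.foldl min x
      · simp [h]
      · simp [h, min_eq_left (le_of_not_ge h)]
    · by_cases h : r.foldl max x ≤ y
      · simp [h]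
      · simp [h, max_eq_left (le_of_not_ge h)]
    · -- dup_min flag
      by_cases h : y ≤ r.foldl min x
      · simp only [if_pos h]
        have hmin : min (r.foldl min x) y = y := min_eq_right h
        simp only [hmin]
        rw [hcnt y, if_pos rfl]
        rcases eq_or_lt_of_le h with he | hlt
        · have hmem : r.foldl min x ∈ x :: r := pv_foldl_min_mem x r
          have : 1 ≤ (x :: r).count (r.foldl min x) := List.count_pos_iff.mpr hmem
          rw [he]
          have h2 : 2 ≤ (x :: r).count (r.foldl min x) + 1 := by omega
          simp [h2]
        · have hnot : y ∉ x :: r := by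
            intro hy
            exact absurd (pv_foldl_min_le x r y hy) (not_le.mpr hlt)
          have : (x :: r).count y = 0 := List.count_eq_zero.mpr hnot
          simp [this, ne_of_lt hlt]
      · simp only [if_neg h]
        have hmin : min (r.foldl min x) y = r.foldl min x := min_eq_left (le_of_not_ge h)
        simp only [hmin]
        rw [hcnt, if_neg (by intro he; exact h (le_of_eq he))]
        simp
    · -- dup_max flag
      by_cases h : r.foldl max x ≤ y
      · simp only [if_pos h]
        have hmax : max (r.foldl max x) y = y := max_eq_right h
        simp only [hmax]
        rw [hcnt y, if_pos rfl]
        rcases eq_or_lt_of_le h with he | hlt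
        · have hmem : r.foldl max x ∈ x :: r := pv_foldl_max_mem x r
          have : 1 ≤ (x :: r).count (r.foldl max x) := List.count_pos_iff.mpr hmem
          rw [← he]
          have h2 : 2 ≤ (x :: r).count (r.foldl max x) + 1 := by omega
          simp [h2]
        · have hnot : y ∉ x :: r := by
            intro hy
            exact absurd (pv_foldl_max_ge x r y hy) (not_le.mpr hlt)
          have : (x :: r).count y = 0 := List.count_eq_zero.mpr hnot
          simp [this, (ne_of_lt hlt).symm]
      · simp only [if_neg h]
        have hmax : max (r.foldl max x) y = r.foldl max x := max_eq_left (le_of_not_ge h)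
        simp only [hmax]
        rw [hcnt, if_neg (by intro he; exact h (le_of_eq he.symm))]
        simp

-- ===== VERDICT (by name: the statement is the Claim_ definition above) =====
theorem has_exactly_one_largest_and_smallest_number_spec : Claim_equal_has_exactly_one_largest_and_smallest_number := by
  intro nums _
  unfold Spec_has_exactly_one_largest_and_smallest_number
  cases nums with
  | nil => rfl
  | cons x r =>
    unfold has_exactly_one_largest_and_smallest_number has_exactly_one_largest_and_smallest_number_alt
    rw [pv_runA, PySem.List.min?_id_cons, PySem.List.max?_id_cons]
    have hc1 : 1 ≤ (x :: r).count (r.foldl min x) :=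
      List.count_pos_iff.mpr (pv_foldl_min_mem x r)
    have hc2 : 1 ≤ (x :: r).count (r.foldl max x) :=
      List.count_pos_iff.mpr (pv_foldl_max_mem x r)
    have e : ∀ n : ℕ, 1 ≤ n → (!decide (2 ≤ n)) = (n == 1) := by
      intro n hn
      by_cases h : 2 ≤ n <;> simp [h] <;> omega
    simp only [PySem.List.count_eq]
    rw [Bool.not_or, e _ hc1, e _ hc2]
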